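-- pv_equiv track=rewrite | github.com/tuanna199/PGC | src/pgc/blastFiltRecord.py | longest_region
-- ===== SOURCE A (Python) =====
-- import collections
--
-- def longest_region(regions):
--     """
--     regions:
--     (1, 128), (1, 129), (1, 149), (1, 153), (1, 154), (1, 160), (1, 164), (1, 166), (1, 167), (2, 66), (2, 160), (3, 158), (3, 160), (4, 160), (6, 160), (6, 166), (7, 160), (28, 107)]
--
--     return:
--     [(1, 167), (2, 160), (6, 166), (28, 107)]
--     """
--     StartList = collections.defaultdict(list)
--     for region in regions:
--         start, end = region
--         StartList[start].append(end)
--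
--     StartEnd = []
--     for start in StartList:
--         ends = StartList[start]
--         maxEnd = max(ends)
--         StartEnd.append((start, maxEnd))
--
--     EndList = collections.defaultdict(list)
--     for region in StartEnd:
--         start, end = region
--         EndList[end].append(start)
--
--     StartEnd2 = []
--     for end in EndList:
--         starts = EndList[end]
--         minStart = min(starts)
--         StartEnd2.append((minStart, end))
--     return sorted(StartEnd2)
-- ===== SOURCE B (Python) =====
-- def _first_by_key(key, xs):
--     # keep the first element of xs for each key value, in order of appearance
--     seen = set()
--     out = []
--     for p in xs:
--         k = key(p)
--         if k not in seen:
--             seen.add(k)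
--             out.append(p)
--     return seen, out
--
--
-- def longest_region(regions):
--     # Scanning the lex-sorted list from the largest element down, the first pair
--     # seen for each start carries that start's maximum end.
--     _, best = _first_by_key(lambda p: p[0], list(reversed(sorted(regions))))
--     # Sorted by (end, start), the first pair seen for each end carries its minimum start.
--     _, res = _first_by_key(lambda p: p[1], sorted(best, key=lambda p: (p[1], p[0])))
--     return sorted(res)
-- ===== Notes on version B (the rewrite author's own statement) =====
-- stated objective: alternative
-- what changed: Replaces A's two defaultdict-bucket accumulation passes (ends grouped per start, then starts per end, with max/min over each bucket) by sort-then-keep-first-occurrence scans: sorting lexicographically and keeping the first pair per start (resp. per (end,start) order, per end) yields the max end / min start directly, so no buckets or reductions are built.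
import Mathlib
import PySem

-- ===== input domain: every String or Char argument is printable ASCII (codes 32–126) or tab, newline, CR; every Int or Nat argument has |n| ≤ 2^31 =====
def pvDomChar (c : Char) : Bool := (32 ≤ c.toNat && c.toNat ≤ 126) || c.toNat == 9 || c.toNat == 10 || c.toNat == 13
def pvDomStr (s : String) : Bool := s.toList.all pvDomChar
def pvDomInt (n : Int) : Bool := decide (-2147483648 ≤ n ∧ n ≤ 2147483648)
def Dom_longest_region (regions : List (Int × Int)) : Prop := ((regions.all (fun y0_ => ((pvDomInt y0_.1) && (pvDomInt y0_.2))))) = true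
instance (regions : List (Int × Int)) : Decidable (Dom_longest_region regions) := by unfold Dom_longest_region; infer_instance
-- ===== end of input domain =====

-- B replaces A's two defaultdict-bucket passes (group ends by start / starts by end, then max/min
-- per bucket) by sort-then-keep-first-occurrence scans; objective: alternative (same result, different algorithm).


-- ===== PORT A =====
-- StartList = defaultdict(list); for (start, end) in regions: StartList[start].append(end)
def pvStartList (regions : List (Int × Int)) : PySem.Dict Int (List Int) :=
  regions.foldl (fun d region => d.modify region.1 [] (fun x => x ++ [region.2])) PySem.Dict.empty

-- for start in StartList: StartEnd.append((start, max(StartList[start])))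
-- max(ends): every key of StartList has a nonempty bucket, so the .getD default is never used
def pvStartEnd (regions : List (Int × Int)) : List (Int × Int) :=
  (pvStartList regions).keys.foldl (fun acc start =>
    acc ++ [(start, (PySem.List.max? ((pvStartList regions).getD start []) (fun x => x)).getD 0)]) []

-- EndList = defaultdict(list); for (start, end) in StartEnd: EndList[end].append(start)
def pvEndList (regions : List (Int × Int)) : PySem.Dict Int (List Int) :=
  (pvStartEnd regions).foldl (fun d region => d.modify region.2 [] (fun x => x ++ [region.1])) PySem.Dict.empty

-- for end in EndList: StartEnd2.append((min(EndList[end]), end))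
def pvStartEnd2 (regions : List (Int × Int)) : List (Int × Int) :=
  (pvEndList regions).keys.foldl (fun acc e =>
    acc ++ [((PySem.List.min? ((pvEndList regions).getD e []) (fun x => x)).getD 0, e)]) []

-- return sorted(StartEnd2)
def longest_region (regions : List (Int × Int)) : List (Int × Int) :=
  PySem.List.sorted2 (pvStartEnd2 regions) (fun p => p.1) (fun p => p.2)

-- ===== PORT B =====
-- _first_by_key(key, xs): keep the first element of xs for each key value, in order
def pvFirstByKey (key : Int × Int → Int) (xs : List (Int × Int)) :
    PySem.Set Int × List (Int × Int) :=
  xs.foldl (fun st p =>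
    if PySem.Set.contains st.1 (key p) then st
    else (PySem.Set.add st.1 (key p), st.2 ++ [p])) (PySem.Set.empty, [])

def longest_region_alt (regions : List (Int × Int)) : List (Int × Int) :=
  let best := (pvFirstByKey (fun p => p.1)
    (PySem.List.sorted2 regions (fun p => p.1) (fun p => p.2)).reverse).2
  let res := (pvFirstByKey (fun p => p.2)
    (PySem.List.sorted2 best (fun p => p.2) (fun p => p.1))).2
  PySem.List.sorted2 res (fun p => p.1) (fun p => p.2)

-- ===== PRECONDITION & SPEC =====
def Spec_longest_region (regions : List (Int × Int)) (out : List (Int × Int)) : Prop := out = longest_region_alt regions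
instance (regions : List (Int × Int)) (out : List (Int × Int)) : Decidable (Spec_longest_region regions out) := by unfold Spec_longest_region; infer_instance

-- ===== CLAIM (what is proved, stated in full; the proofs are below) =====
def Claim_equal_longest_region : Prop := ∀ (regions : List (Int × Int)), Dom_longest_region regions → Spec_longest_region regions (longest_region regions)

-- ===== LEMMAS AND PROOFS =====

-- spec-level descriptions of A's intermediate data
def pvEndsOf (regions : List (Int × Int)) (s : Int) : List Int :=
  (regions.filter (fun p => p.1 == s)).map (fun p => p.2)
def pvAM (regions : List (Int × Int)) (s : Int) : Int :=
  (PySem.List.max? (pvEndsOf regions s) (fun x => x)).getD 0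
def pvSE (regions : List (Int × Int)) : List (Int × Int) :=
  (PySem.Set.ofList (regions.map (fun p => p.1))).map (fun s => (s, pvAM regions s))
def pvStartsFor (regions : List (Int × Int)) (e : Int) : List Int :=
  ((pvSE regions).filter (fun p => p.2 == e)).map (fun p => p.1)
def pvAm (regions : List (Int × Int)) (e : Int) : Int :=
  (PySem.List.min? (pvStartsFor regions e) (fun x => x)).getD 0
def pvPre (regions : List (Int × Int)) : List (Int × Int) :=
  (PySem.Set.ofList ((pvSE regions).map (fun p => p.2))).map (fun e => (pvAm regions e, e))

-- recursive form of pvFirstByKey's loop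
def pvFP (key : Int × Int → Int) (seen : PySem.Set Int) : List (Int × Int) → List (Int × Int)
  | [] => []
  | x :: t =>
    if PySem.Set.contains seen (key x) then pvFP key seen t
    else x :: pvFP key (PySem.Set.add seen (key x)) t

lemma fp_general (key : Int × Int → Int) (xs : List (Int × Int)) :
    ∀ (seen : PySem.Set Int) (out : List (Int × Int)),
    (xs.foldl (fun st p =>
      if PySem.Set.contains st.1 (key p) then st
      else (PySem.Set.add st.1 (key p), st.2 ++ [p])) (seen, out)).2
      = out ++ pvFP key seen xs := by
  induction xs with
  | nil => intro seen out; simp [pvFP]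
  | cons x t ih =>
    intro seen out
    simp only [List.foldl_cons, pvFP]
    by_cases h : PySem.Set.contains seen (key x) = true
    · rw [if_pos h, if_pos h]
      exact ih seen out
    · rw [if_neg h, if_neg h]
      rw [ih (PySem.Set.add seen (key x)) (out ++ [x])]
      simp

lemma pvFirstByKey_eq (key : Int × Int → Int) (xs : List (Int × Int)) :
    (pvFirstByKey key xs).2 = pvFP key PySem.Set.empty xs := by
  unfold pvFirstByKey
  simpa using fp_general key xs PySem.Set.empty []

lemma pvFP_mem (key : Int × Int → Int) (xs : List (Int × Int)) :
    ∀ (seen : PySem.Set Int), ∀ p ∈ pvFP key seen xs,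
      p ∈ xs ∧ PySem.Set.contains seen (key p) = false := by
  induction xs with
  | nil => intro seen p hp; simp [pvFP] at hp
  | cons x t ih =>
    intro seen p hp
    rw [pvFP] at hp
    by_cases h : PySem.Set.contains seen (key x) = true
    · rw [if_pos h] at hp
      obtain ⟨h1, h2⟩ := ih seen p hp
      exact ⟨List.mem_cons_of_mem _ h1, h2⟩
    · rw [if_neg h] at hp
      rcases List.mem_cons.mp hp with rfl | hp'
      · exact ⟨List.mem_cons_self, by simpa using h⟩
      · obtain ⟨h1, h2⟩ := ih _ p hp'
        refine ⟨List.mem_cons_of_mem _ h1, ?_⟩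
        rw [Bool.eq_false_iff, Ne, PySem.Set.contains_iff] at h2 ⊢
        intro hm; exact h2 (by rw [PySem.Set.mem_add]; exact Or.inl hm)

lemma pvFP_nodup (key : Int × Int → Int) (xs : List (Int × Int)) :
    ∀ (seen : PySem.Set Int), ((pvFP key seen xs).map key).Nodup := by
  induction xs with
  | nil => intro seen; simp [pvFP]
  | cons x t ih =>
    intro seen
    rw [pvFP]
    by_cases h : PySem.Set.contains seen (key x) = true
    · rw [if_pos h]; exact ih seen
    · rw [if_neg h]
      simp only [List.map_cons, List.nodup_cons]
      refine ⟨?_, ih _⟩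
      intro hmem
      obtain ⟨p, hp, hkp⟩ := List.mem_map.mp hmem
      have h2 := (pvFP_mem key t _ p hp).2
      rw [Bool.eq_false_iff, Ne, PySem.Set.contains_iff, PySem.Set.mem_add] at h2
      exact h2 (Or.inr hkp)

lemma pvFP_covers (key : Int × Int → Int) (xs : List (Int × Int)) :
    ∀ (seen : PySem.Set Int), ∀ q ∈ xs, PySem.Set.contains seen (key q) = false →
      ∃ p ∈ pvFP key seen xs, key p = key q := by
  induction xs with
  | nil => intro seen q hq; simp at hq
  | cons x t ih =>
    intro seen q hq hnc
    rw [pvFP]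
    by_cases h : PySem.Set.contains seen (key x) = true
    · rw [if_pos h]
      rcases List.mem_cons.mp hq with rfl | hq'
      · rw [h] at hnc; cases hnc
      · exact ih seen q hq' hnc
    · rw [if_neg h]
      rcases List.mem_cons.mp hq with rfl | hq'
      · exact ⟨_, List.mem_cons_self, rfl⟩
      · by_cases hk : key q = key x
        · exact ⟨x, List.mem_cons_self, hk.symm⟩
        · have hnc' : PySem.Set.contains (PySem.Set.add seen (key x)) (key q) = false := by
            rw [Bool.eq_false_iff, Ne, PySem.Set.contains_iff, PySem.Set.mem_add]
            rw [Bool.eq_false_iff, Ne, PySem.Set.contains_iff] at hnc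
            rintro (hm | hm); exact hnc hm; exact hk hm
          obtain ⟨p, hp, hkp⟩ := ih _ q hq' hnc'
          exact ⟨p, List.mem_cons_of_mem _ hp, hkp⟩

lemma pvFP_first (key : Int × Int → Int) (R : Int × Int → Int × Int → Prop)
    (xs : List (Int × Int)) :
    ∀ (seen : PySem.Set Int), xs.Pairwise R →
      ∀ p ∈ pvFP key seen xs, ∀ q ∈ xs, key q = key p → p = q ∨ R p q := by
  induction xs with
  | nil => intro seen _ p hp; simp [pvFP] at hp
  | cons x t ih =>
    intro seen hpw p hp q hq hkq
    obtain ⟨hRx, hpwt⟩ := List.pairwise_cons.mp hpw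
    rw [pvFP] at hp
    by_cases h : PySem.Set.contains seen (key x) = true
    · rw [if_pos h] at hp
      rcases List.mem_cons.mp hq with rfl | hq'
      · have h2 := (pvFP_mem key t _ p hp).2
        rw [hkq] at h; rw [h] at h2; cases h2
      · exact ih seen hpwt p hp q hq' hkq
    · rw [if_neg h] at hp
      rcases List.mem_cons.mp hp with rfl | hp'
      · rcases List.mem_cons.mp hq with rfl | hq'
        · exact Or.inl rfl
        · exact Or.inr (hRx q hq')
      · rcases List.mem_cons.mp hq with rfl | hq'
        · have h2 := (pvFP_mem key t _ p hp').2
          rw [Bool.eq_false_iff, Ne, PySem.Set.contains_iff, PySem.Set.mem_add] at h2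
          exact absurd (Or.inr hkq.symm) h2
        · exact ih _ hpwt p hp' q hq' hkq

-- the lexicographic reading of Python's two-key sort
lemma key_lex (a b : Int × Int) (k1 k2 : Int × Int → Int) :
    (decide (k1 a < k1 b) || (!decide (k1 b < k1 a) && decide (k2 a < k2 b)))
      = decide (toLex (k1 a, k2 a) < toLex (k1 b, k2 b)) := by
  rcases lt_trichotomy (k1 a) (k1 b) with h | h | h
  · simp [Prod.Lex.lt_iff, h]
  · simp [Prod.Lex.lt_iff, h]
  · simp [Prod.Lex.lt_iff, not_lt_of_gt h, h, ne_of_gt h]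

lemma sorted2_lex (xs : List (Int × Int)) (k1 k2 : Int × Int → Int) :
    PySem.List.sorted2 xs k1 k2 = PySem.List.sorted xs (fun p => toLex (k1 p, k2 p)) := by
  rw [PySem.List.sorted_eq_foldl_insertBy]
  unfold PySem.List.sorted2
  simp only [if_neg (by decide : ¬ (false = true))]
  have h : (fun a b => decide (k1 a < k1 b) || (!decide (k1 b < k1 a) && decide (k2 a < k2 b)))
      = (fun a b : Int × Int => decide (toLex (k1 a, k2 a) < toLex (k1 b, k2 b))) := by
    funext a b; exact key_lex a b k1 k2
  rw [h]


lemma AM_spec (regions : List (Int × Int)) (s : Int) (h : s ∈ regions.map (fun p => p.1)) :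
    pvAM regions s ∈ pvEndsOf regions s ∧ ∀ y ∈ pvEndsOf regions s, y ≤ pvAM regions s := by
  have hne : pvEndsOf regions s ≠ [] := by
    obtain ⟨p, hp, hps⟩ := List.mem_map.mp h
    have : p.2 ∈ pvEndsOf regions s := by
      unfold pvEndsOf
      exact List.mem_map_of_mem (List.mem_filter.mpr ⟨hp, by simp [hps]⟩)
    exact List.ne_nil_of_mem this
  obtain ⟨m, hm⟩ : ∃ m, PySem.List.max? (pvEndsOf regions s) (fun x => x) = some m := by
    cases hmx : PySem.List.max? (pvEndsOf regions s) (fun x => x) with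
    | none => exact absurd ((PySem.List.max?_eq_none_iff _ _).mp hmx) hne
    | some m => exact ⟨m, rfl⟩
  have : pvAM regions s = m := by unfold pvAM; rw [hm]; rfl
  rw [this]
  exact ⟨PySem.List.max?_mem hm, fun y hy => PySem.List.max?_isMax hm y hy⟩

lemma Am_spec (regions : List (Int × Int)) (e : Int) (h : e ∈ (pvSE regions).map (fun p => p.2)) :
    pvAm regions e ∈ pvStartsFor regions e ∧ ∀ y ∈ pvStartsFor regions e, pvAm regions e ≤ y := by
  have hne : pvStartsFor regions e ≠ [] := by
    obtain ⟨p, hp, hpe⟩ := List.mem_map.mp h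
    have : p.1 ∈ pvStartsFor regions e := by
      unfold pvStartsFor
      exact List.mem_map_of_mem (List.mem_filter.mpr ⟨hp, by simp [hpe]⟩)
    exact List.ne_nil_of_mem this
  obtain ⟨m, hm⟩ : ∃ m, PySem.List.min? (pvStartsFor regions e) (fun x => x) = some m := by
    cases hmx : PySem.List.min? (pvStartsFor regions e) (fun x => x) with
    | none => exact absurd ((PySem.List.min?_eq_none_iff _ _).mp hmx) hne
    | some m => exact ⟨m, rfl⟩
  have : pvAm regions e = m := by unfold pvAm; rw [hm]; rfl
  rw [this]
  exact ⟨PySem.List.min?_mem hm, fun y hy => PySem.List.min?_isMin hm y hy⟩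

lemma mem_pvSE (regions : List (Int × Int)) (p : Int × Int) :
    p ∈ pvSE regions ↔ p.1 ∈ regions.map (fun q => q.1) ∧ p.2 = pvAM regions p.1 := by
  unfold pvSE
  rw [List.mem_map]
  constructor
  · rintro ⟨s, hs, rfl⟩
    exact ⟨(PySem.Set.mem_ofList _ _).mp hs, rfl⟩
  · rintro ⟨h1, h2⟩
    exact ⟨p.1, (PySem.Set.mem_ofList _ _).mpr h1, by rw [← h2]⟩

lemma mem_pvPre (regions : List (Int × Int)) (p : Int × Int) :
    p ∈ pvPre regions ↔ p.2 ∈ (pvSE regions).map (fun q => q.2) ∧ p.1 = pvAm regions p.2 := by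
  unfold pvPre
  rw [List.mem_map]
  constructor
  · rintro ⟨e, he, rfl⟩
    exact ⟨(PySem.Set.mem_ofList _ _).mp he, rfl⟩
  · rintro ⟨h1, h2⟩
    exact ⟨p.2, (PySem.Set.mem_ofList _ _).mpr h1, by rw [← h2]⟩

lemma contains_empty_false (k : Int) : PySem.Set.contains PySem.Set.empty k = false := by
  rw [Bool.eq_false_iff, Ne, PySem.Set.contains_iff]
  simp [PySem.Set.empty]


-- A's intermediate lists, read off via the PySem dict lemmas
lemma startEnd_eq (regions : List (Int × Int)) : pvStartEnd regions = pvSE regions := by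
  have hk1 : (pvStartList regions).keys = PySem.Set.ofList (regions.map (fun p => p.1)) := by
    unfold pvStartList
    rw [PySem.Dict.keys_foldl_modify_key regions (fun p => p.1) []
      (fun _ region => (fun x => x ++ [region.2]))]
    simp [PySem.Set.ofList_eq_foldl, PySem.Set.update]
  have hg1 : ∀ s, (pvStartList regions).getD s [] = pvEndsOf regions s := by
    intro s
    unfold pvStartList
    rw [PySem.Dict.getD_foldl_modify_append]
    simp [pvEndsOf]
  unfold pvStartEnd
  rw [PySem.List.foldl_append_singleton_eq_map
    (fun start => (start, (PySem.List.max? ((pvStartList regions).getD start [])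
      (fun x => x)).getD 0))]
  rw [hk1]
  unfold pvSE
  have hf : (fun start => (start, (PySem.List.max? ((pvStartList regions).getD start [])
      (fun x => x)).getD 0)) = (fun s => (s, pvAM regions s)) := by
    funext s; rw [hg1 s]; rfl
  rw [hf]
  rfl

lemma startEnd2_eq (regions : List (Int × Int)) : pvStartEnd2 regions = pvPre regions := by
  have hswap : pvEndList regions = ((pvSE regions).map Prod.swap).foldl
      (fun d region => d.modify region.1 [] (fun x => x ++ [region.2])) PySem.Dict.empty := by
    unfold pvEndList
    rw [List.foldl_map, startEnd_eq]
    rfl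
  have hk2 : (pvEndList regions).keys = PySem.Set.ofList ((pvSE regions).map (fun p => p.2)) := by
    rw [hswap]
    rw [PySem.Dict.keys_foldl_modify_key ((pvSE regions).map Prod.swap) (fun p => p.1) []
      (fun _ region => (fun x => x ++ [region.2]))]
    simp only [PySem.Set.ofList_eq_foldl, PySem.Set.update, PySem.Dict.keys_empty, List.map_map]
    rfl
  have hg2 : ∀ e, (pvEndList regions).getD e [] = pvStartsFor regions e := by
    intro e
    rw [hswap]
    rw [PySem.Dict.getD_foldl_modify_append]
    simp only [PySem.Dict.getD_empty, List.nil_append, List.filter_map, List.map_map]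
    unfold pvStartsFor
    congr 1
  unfold pvStartEnd2
  rw [PySem.List.foldl_append_singleton_eq_map
    (fun e => ((PySem.List.min? ((pvEndList regions).getD e []) (fun x => x)).getD 0, e))]
  rw [hk2]
  unfold pvPre
  have hf : (fun e => ((PySem.List.min? ((pvEndList regions).getD e []) (fun x => x)).getD 0, e))
      = (fun e => (pvAm regions e, e)) := by
    funext e; rw [hg2 e]; rfl
  rw [hf]
  rfl

lemma best_perm (regions : List (Int × Int)) :
    ((pvFirstByKey (fun p => p.1)
      (PySem.List.sorted2 regions (fun p => p.1) (fun p => p.2)).reverse).2).Perm (pvSE regions) := by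
  set zs := (PySem.List.sorted2 regions (fun p => p.1) (fun p => p.2)).reverse with hzs
  rw [pvFirstByKey_eq]
  have hperm : zs.Perm regions := by
    rw [hzs]
    exact (List.reverse_perm _).trans (by rw [sorted2_lex]; exact PySem.List.sorted_perm _ _ _)
  have hpw : zs.Pairwise (fun a b : Int × Int =>
      toLex (b.1, b.2) ≤ toLex (a.1, a.2)) := by
    rw [hzs, sorted2_lex, List.pairwise_reverse]
    have := PySem.List.sorted_pairwise regions (fun p : Int × Int => toLex (p.1, p.2))
    exact this
  -- forward characterization
  have hfwd : ∀ p ∈ pvFP (fun p => p.1) PySem.Set.empty zs, p ∈ pvSE regions := by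
    intro p hp
    have hpz : p ∈ zs := (pvFP_mem _ zs _ p hp).1
    have hpr : p ∈ regions := hperm.mem_iff.mp hpz
    have hs : p.1 ∈ regions.map (fun q => q.1) := List.mem_map_of_mem hpr
    have hmax : ∀ y ∈ pvEndsOf regions p.1, y ≤ p.2 := by
      intro y hy
      obtain ⟨q, hq, hqy⟩ := List.mem_map.mp hy
      have hqf := List.mem_filter.mp hq
      have hq1 : q.1 = p.1 := by simpa using hqf.2
      have hqz : q ∈ zs := hperm.mem_iff.mpr hqf.1
      rcases pvFP_first (fun p => p.1) _ zs _ hpw p hp q hqz hq1 with rfl | hle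
      · omega
      · rw [Prod.Lex.le_iff] at hle
        simp only [ofLex_toLex, hq1] at hle
        rcases hle with hlt | ⟨_, hle2⟩
        · exact absurd hlt (lt_irrefl _)
        · omega
    have hin : p.2 ∈ pvEndsOf regions p.1 := by
      unfold pvEndsOf
      exact List.mem_map_of_mem (List.mem_filter.mpr ⟨hpr, by simp⟩)
    obtain ⟨hAMin, hAMmax⟩ := AM_spec regions p.1 hs
    have : p.2 = pvAM regions p.1 := le_antisymm (hAMmax _ hin) (hmax _ hAMin)
    exact (mem_pvSE regions p).mpr ⟨hs, this⟩
  -- backward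
  have hbwd : ∀ p ∈ pvSE regions, p ∈ pvFP (fun p => p.1) PySem.Set.empty zs := by
    intro p hp
    obtain ⟨hs, hAM⟩ := (mem_pvSE regions p).mp hp
    obtain ⟨q, hq, hq1⟩ := List.mem_map.mp hs
    have hqz : q ∈ zs := hperm.mem_iff.mpr hq
    obtain ⟨r, hr, hr1⟩ := pvFP_covers (fun p => p.1) zs _ q hqz (contains_empty_false _)
    have hrSE := hfwd r hr
    obtain ⟨_, hrAM⟩ := (mem_pvSE regions r).mp hrSE
    have : r = p := by
      have h1 : r.1 = p.1 := by rw [hr1, hq1]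
      exact Prod.ext h1 (by rw [hrAM, hAM, h1])
    rwa [this] at hr
  have hnod1 : (pvFP (fun p => p.1) PySem.Set.empty zs).Nodup :=
    (pvFP_nodup (fun p => p.1) zs PySem.Set.empty).of_map
  have hnod2 : (pvSE regions).Nodup := by
    unfold pvSE
    exact (PySem.Set.nodup_ofList _).map (fun a b hab => congrArg Prod.fst hab)
  exact (List.perm_ext_iff_of_nodup hnod1 hnod2).mpr (fun a => ⟨hfwd a, hbwd a⟩)

lemma res_perm (regions : List (Int × Int)) (best : List (Int × Int))
    (hb : best.Perm (pvSE regions)) :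
    ((pvFirstByKey (fun p => p.2)
      (PySem.List.sorted2 best (fun p => p.2) (fun p => p.1))).2).Perm (pvPre regions) := by
  set ys := PySem.List.sorted2 best (fun p => p.2) (fun p => p.1) with hys
  rw [pvFirstByKey_eq]
  have hperm : ys.Perm (pvSE regions) := by
    rw [hys, sorted2_lex]
    exact (PySem.List.sorted_perm _ _ _).trans hb
  have hpw : ys.Pairwise (fun a b : Int × Int =>
      toLex (a.2, a.1) ≤ toLex (b.2, b.1)) := by
    rw [hys, sorted2_lex]
    exact PySem.List.sorted_pairwise best (fun p : Int × Int => toLex (p.2, p.1))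
  have hfwd : ∀ p ∈ pvFP (fun p => p.2) PySem.Set.empty ys, p ∈ pvPre regions := by
    intro p hp
    have hpy : p ∈ ys := (pvFP_mem _ ys _ p hp).1
    have hpSE : p ∈ pvSE regions := hperm.mem_iff.mp hpy
    have he : p.2 ∈ (pvSE regions).map (fun q => q.2) := List.mem_map_of_mem hpSE
    have hmin : ∀ y ∈ pvStartsFor regions p.2, p.1 ≤ y := by
      intro y hy
      obtain ⟨q, hq, hqy⟩ := List.mem_map.mp hy
      have hqf := List.mem_filter.mp hq
      have hq2 : q.2 = p.2 := by simpa using hqf.2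
      have hqy' : q ∈ ys := hperm.mem_iff.mpr hqf.1
      rcases pvFP_first (fun p => p.2) _ ys _ hpw p hp q hqy' hq2 with rfl | hle
      · omega
      · rw [Prod.Lex.le_iff] at hle
        simp only [ofLex_toLex, hq2] at hle
        rcases hle with hlt | ⟨_, hle2⟩
        · exact absurd hlt (lt_irrefl _)
        · omega
    have hin : p.1 ∈ pvStartsFor regions p.2 := by
      unfold pvStartsFor
      exact List.mem_map_of_mem (List.mem_filter.mpr ⟨hpSE, by simp⟩)
    obtain ⟨hAmin, hAmmin⟩ := Am_spec regions p.2 he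
    have : p.1 = pvAm regions p.2 := le_antisymm (hmin _ hAmin) (hAmmin _ hin)
    exact (mem_pvPre regions p).mpr ⟨he, this⟩
  have hbwd : ∀ p ∈ pvPre regions, p ∈ pvFP (fun p => p.2) PySem.Set.empty ys := by
    intro p hp
    obtain ⟨he, hAm⟩ := (mem_pvPre regions p).mp hp
    obtain ⟨q, hq, hq2⟩ := List.mem_map.mp he
    have hqy : q ∈ ys := hperm.mem_iff.mpr hq
    obtain ⟨r, hr, hr2⟩ := pvFP_covers (fun p => p.2) ys _ q hqy (contains_empty_false _)
    have hrPre := hfwd r hr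
    obtain ⟨_, hrAm⟩ := (mem_pvPre regions r).mp hrPre
    have : r = p := by
      have h2 : r.2 = p.2 := by rw [hr2, hq2]
      exact Prod.ext (by rw [hrAm, hAm, h2]) h2
    rwa [this] at hr
  have hnod1 : (pvFP (fun p => p.2) PySem.Set.empty ys).Nodup :=
    (pvFP_nodup (fun p => p.2) ys PySem.Set.empty).of_map
  have hnod2 : (pvPre regions).Nodup := by
    unfold pvPre
    exact (PySem.Set.nodup_ofList _).map (fun a b hab => congrArg Prod.snd hab)
  exact (List.perm_ext_iff_of_nodup hnod1 hnod2).mpr (fun a => ⟨hfwd a, hbwd a⟩)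


-- ===== VERDICT (by name: the statement is the Claim_ definition above) =====
theorem longest_region_spec : Claim_equal_longest_region := by
  unfold Claim_equal_longest_region
  intro regions _
  unfold Spec_longest_region
  unfold longest_region
  rw [startEnd2_eq]
  show PySem.List.sorted2 _ _ _ = longest_region_alt regions
  unfold longest_region_alt
  rw [sorted2_lex (pvPre regions), sorted2_lex ((pvFirstByKey _ _).2)]
  refine PySem.List.sorted_eq_sorted_of_perm _ _ _ ?_ ?_
  · intro p q hpq
    have := toLex.injective hpq
    exact Prod.ext (congrArg Prod.fst this) (congrArg Prod.snd this)
  · exact (res_perm regions _ (best_perm regions)).symm
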